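-- pv_equiv track=rewrite | github.com/Ferlab-Ste-Justine/clin-pipelines-dags | dags/lib/franklin.py | group_families_from_clinical_data
-- ===== SOURCE A (Python) =====
-- from collections import defaultdict
-- from typing import Dict, List, Optional, Tuple
--
-- def group_families_from_clinical_data(clinical_data: List[dict]) -> Tuple[Dict[str, List[dict]], List[dict]]:
--     # Separate rows with and without family_id
--     family_analyses = [row for row in clinical_data if row.get('family_id') is not None]
--     solo_analyses = [row for row in clinical_data if row.get('family_id') is None]
--
--     # Group rows by family_id
--     family_groups: Dict[str, List[dict]] = defaultdict(list)
--     for row in family_analyses: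
--         family_id = row['family_id']
--         family_groups[family_id].append(row)
--
--     return family_groups, solo_analyses
-- ===== SOURCE B (Python) =====
-- from collections import defaultdict
--
-- def group_families_from_clinical_data(clinical_data):
--     # Key-index-then-gather: first collect the distinct family_ids in order of
--     # first appearance, then build each family's group by gathering its rows
--     # from the full list; no dict is grown incrementally.
--     family_ids = []
--     for row in clinical_data:
--         fid = row.get('family_id')
--         if fid is not None and fid not in family_ids:
--             family_ids.append(fid)
--     family_groups = defaultdict(list, {
--         fid: [row for row in clinical_data if row.get('family_id') == fid]
--         for fid in family_ids
--     })
--     solo_analyses = [row for row in clinical_data if row.get('family_id') is None]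
--     return family_groups, solo_analyses
-- ===== Notes on version B (the rewrite author's own statement) =====
-- stated objective: alternative
-- what changed: Replaces A's incremental defaultdict-building loop over pre-filtered rows with a key-index-then-gather scheme: collect the distinct family_ids in first-appearance order, then build each family's group by a per-key filter of the input (no dict is grown row by row).
import Mathlib
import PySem

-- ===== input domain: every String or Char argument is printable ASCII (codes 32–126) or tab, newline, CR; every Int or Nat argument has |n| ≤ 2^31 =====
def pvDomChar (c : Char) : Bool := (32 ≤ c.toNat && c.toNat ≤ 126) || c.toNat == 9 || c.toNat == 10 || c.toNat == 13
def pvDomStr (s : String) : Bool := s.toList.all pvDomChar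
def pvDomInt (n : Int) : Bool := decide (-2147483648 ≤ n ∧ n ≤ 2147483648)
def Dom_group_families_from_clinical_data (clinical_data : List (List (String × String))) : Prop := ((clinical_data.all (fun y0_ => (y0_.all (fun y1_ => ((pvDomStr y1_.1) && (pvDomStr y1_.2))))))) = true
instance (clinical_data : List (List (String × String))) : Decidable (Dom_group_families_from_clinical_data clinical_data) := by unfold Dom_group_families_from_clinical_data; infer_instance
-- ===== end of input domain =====

-- B replaces A's dict-building loop by a key-index-then-gather scheme: collect the distinct
-- family_ids in first-appearance order, then gather each family's rows by filtering the input
-- per key; no dict is grown incrementally (objective: alternative, same results).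

-- row.get('family_id') (first-match lookup on the association-list row)
def pvRowGet (row : List (String × String)) : Option String :=
  (PySem.Dict.mk row).get? "family_id"

-- the grouping key A reads on rows that passed the family filter: row['family_id']
def pvKey (row : List (String × String)) : String := (pvRowGet row).getD ""

-- ===== PORT A =====
def group_families_from_clinical_data (clinical_data : List (List (String × String))) : (List (String × List (List (String × String)))) × (List (List (String × String))) :=
  -- family_analyses / solo_analyses: the two comprehensions
  let family_analyses := clinical_data.filter (fun row => (pvRowGet row).isSome)
  let solo_analyses := clinical_data.filter (fun row => (pvRowGet row).isSome = false)
  -- grouping loop; row['family_id'] never misses on family_analyses, ported as getD ""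
  let family_groups := family_analyses.foldl
    (fun (d : PySem.Dict String (List (List (String × String)))) row =>
      d.modify (pvKey row) [] (· ++ [row])) PySem.Dict.empty
  (family_groups.items, solo_analyses)

-- ===== PORT B =====
def group_families_from_clinical_data_alt (clinical_data : List (List (String × String))) : (List (String × List (List (String × String)))) × (List (List (String × String))) :=
  -- distinct family_ids in first-appearance order
  let family_ids := clinical_data.foldl
    (fun (acc : List String) row =>
      match pvRowGet row with
      | some fid => if acc.contains fid then acc else acc ++ [fid]
      | none => acc) []
  -- gather each family's rows from the full list (dict comprehension)
  let family_groups := family_ids.map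
    (fun fid => (fid, clinical_data.filter (fun row => pvRowGet row == some fid)))
  let solo_analyses := clinical_data.filter (fun row => (pvRowGet row).isNone)
  (family_groups, solo_analyses)

-- ===== PRECONDITION & SPEC =====
def Spec_group_families_from_clinical_data (clinical_data : List (List (String × String))) (out : (List (String × List (List (String × String)))) × (List (List (String × String)))) : Prop := out = group_families_from_clinical_data_alt clinical_data
instance (clinical_data : List (List (String × String))) (out : (List (String × List (List (String × String)))) × (List (List (String × String)))) : Decidable (Spec_group_families_from_clinical_data clinical_data out) := by unfold Spec_group_families_from_clinical_data; infer_instance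

-- ===== CLAIM (what is proved, stated in full; the proofs are below) =====
def Claim_equal_group_families_from_clinical_data : Prop := ∀ (clinical_data : List (List (String × String))), Dom_group_families_from_clinical_data clinical_data → Spec_group_families_from_clinical_data clinical_data (group_families_from_clinical_data clinical_data)

-- ===== LEMMAS AND PROOFS =====

-- B's family_ids loop IS Set.ofList of the keys of the family rows
theorem pv_fids (l : List (List (String × String))) (s : List String) :
    l.foldl
      (fun (acc : List String) row =>
        match pvRowGet row with
        | some fid => if acc.contains fid then acc else acc ++ [fid]
        | none => acc) s
    = PySem.Set.update s ((l.filter (fun row => (pvRowGet row).isSome)).map pvKey) := by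
  induction l generalizing s with
  | nil => simp [PySem.Set.update]
  | cons r t ih =>
    cases hg : pvRowGet r with
    | none =>
      rw [List.foldl_cons]; simp only [hg]
      rw [ih]; simp [hg]
    | some fid =>
      simp only [List.foldl_cons, hg, List.filter_cons, Option.isSome_some,
        if_true, List.map_cons, PySem.Set.update_cons, ih]
      have : pvKey r = fid := by simp [pvKey, hg]
      simp [this, PySem.Set.add]

-- pointwise: a row matches key fid iff its lookup is `some fid` (among family rows)
theorem pv_match (r : List (String × String)) (fid : String) :
    ((pvKey r == fid) && (pvRowGet r).isSome) = (pvRowGet r == some fid) := by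
  cases hg : pvRowGet r with
  | none => simp
  | some g => simp [pvKey, hg]

-- ===== VERDICT (by name: the statement is the Claim_ definition above) =====
theorem group_families_from_clinical_data_spec : Claim_equal_group_families_from_clinical_data := by
  intro cd _
  unfold Spec_group_families_from_clinical_data
  unfold group_families_from_clinical_data group_families_from_clinical_data_alt
  simp only []
  set fam := cd.filter (fun row => (pvRowGet row).isSome) with hfam
  -- the grouping loop as a fold over (key, row) pairs
  have hpairs :
      fam.foldl
        (fun (d : PySem.Dict String (List (List (String × String)))) row =>
          d.modify (pvKey row) [] (· ++ [row])) PySem.Dict.empty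
      = (fam.map (fun r => (pvKey r, r))).foldl
          (fun d p => d.modify p.1 [] (· ++ [p.2])) PySem.Dict.empty := by
    rw [List.foldl_map]
  have hkeys :
      ((fam.map (fun r => (pvKey r, r))).foldl
          (fun d p => d.modify p.1 [] (· ++ [p.2])) PySem.Dict.empty).keys
      = PySem.Set.ofList (fam.map pvKey) := by
    rw [PySem.Dict.keys_foldl_modify_key (key := Prod.fst)]
    simp [PySem.Dict.keys, PySem.Dict.empty, PySem.Set.update_nil_left, List.map_map]
    rfl
  have hnodup :
      ((fam.map (fun r => (pvKey r, r))).foldl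
          (fun d p => d.modify p.1 [] (· ++ [p.2])) PySem.Dict.empty).keys.Nodup := by
    rw [hkeys]; exact PySem.Set.nodup_ofList _
  simp only [Prod.mk.injEq]
  constructor
  · -- dict items = B's keyed gather
    rw [hpairs, PySem.Dict.items_eq_map_keys _ hnodup []]
    rw [hkeys]
    rw [pv_fids]
    rw [PySem.Set.update_nil_left]
    apply List.map_congr_left
    intro fid _
    congr 1
    -- value at fid: the fold's getD is the filtered gather
    rw [PySem.Dict.getD_foldl_modify_append]
    simp only [PySem.Dict.getD_empty, List.nil_append]
    rw [List.filter_map, List.map_map]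
    have : fam.filter ((fun p => p.1 == fid) ∘ fun r => (pvKey r, r))
        = cd.filter (fun row => pvRowGet row == some fid) := by
      rw [hfam, List.filter_filter]
      apply List.filter_congr
      intro r _
      simpa using pv_match r fid
    rw [this]
    have hid : ((fun x : String × List (String × String) => x.2) ∘ fun r => (pvKey r, r)) = id := rfl
    rw [hid, List.map_id]
  · -- solo lists
    apply List.filter_congr
    intro r _
    cases hg : pvRowGet r <;> simp
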